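-- pv_equiv track=rewrite | github.com/nick-hiebl/adventofcode | y2016/day07/main.py | find_abas
-- ===== SOURCE A (Python) =====
-- def find_abas(s):
--   ins, outs = set(), set()
--   inside = False
--   for k in zip(s, s[1:], s[2:]):
--     if len(k) < 3:
--       continue
--     if k[0] == '[':
--       inside = True
--       continue
--     if k[0] == ']':
--       inside = False
--       continue
--
--     if '[' in k or ']' in k:
--       continue
--     if k[0] == k[2] and k[1] != k[0]:
--       (ins if inside else outs).add((k[0], k[1]))
--
--   return outs, ins
-- ===== SOURCE B (Python) =====
-- def _aba_pairs(run):
--     # sliding 3-char window over one bracket-free run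
--     res = []
--     while len(run) >= 3:
--         a, b, c = run[0], run[1], run[2]
--         if a == c and b != a:
--             res.append((a, b))
--         run = run[1:]
--     return res
--
--
-- def find_abas(s):
--     # pass 1: segment into bracket-free runs tagged with the inside flag
--     runs = []
--     cur = []
--     inside = False
--     for ch in s:
--         if ch == '[' or ch == ']':
--             if cur:
--                 runs.append((cur, inside))
--             cur = []
--             inside = ch == '['
--         else:
--             cur.append(ch)
--     if cur:
--         runs.append((cur, inside))
--     # pass 2: ABA detection per run
--     outs, ins = set(), set()
--     for run, flag in runs:
--         for pair in _aba_pairs(run):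
--             (ins if flag else outs).add(pair)
--     return outs, ins
-- ===== Notes on version B (the rewrite author's own statement) =====
-- stated objective: alternative
-- what changed: A's single fused loop over zip3 triples with an inline bracket state machine is replaced by two separate passes: first segment the string into bracket-free runs tagged with a last-bracket-wins inside flag, then slide a 3-char window over each run to collect ABA pairs.
import Mathlib
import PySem

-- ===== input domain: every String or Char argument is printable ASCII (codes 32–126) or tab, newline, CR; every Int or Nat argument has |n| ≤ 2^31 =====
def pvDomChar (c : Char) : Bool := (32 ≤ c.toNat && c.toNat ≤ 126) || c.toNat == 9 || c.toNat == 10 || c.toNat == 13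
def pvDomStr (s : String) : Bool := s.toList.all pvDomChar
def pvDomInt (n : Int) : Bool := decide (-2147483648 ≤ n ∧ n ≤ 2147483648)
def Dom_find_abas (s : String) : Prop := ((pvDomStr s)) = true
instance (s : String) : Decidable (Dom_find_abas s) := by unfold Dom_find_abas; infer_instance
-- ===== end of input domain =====

-- B replaces A's fused zip3 state-machine loop by two passes — segment the string into
-- bracket-free runs tagged inside/outside, then slide a 3-char window over each run (alternative decomposition).

-- ===== PORT A =====
-- one step of A's loop body; state = (ins, outs, inside)
def pvStepA (st : PySem.Set (String × String) × PySem.Set (String × String) × Bool)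
    (k : Char × Char × Char) :
    PySem.Set (String × String) × PySem.Set (String × String) × Bool :=
  let (ins, outs, inside) := st
  if (3 : Nat) < 3 then (ins, outs, inside)   -- 'if len(k) < 3: continue' (a zip triple always has 3 components)
  else if k.1 = '[' then (ins, outs, true)
  else if k.1 = ']' then (ins, outs, false)
  else if k.1 = '[' ∨ k.2.1 = '[' ∨ k.2.2 = '[' ∨ k.1 = ']' ∨ k.2.1 = ']' ∨ k.2.2 = ']' then
    (ins, outs, inside)
  else if k.1 = k.2.2 ∧ k.2.1 ≠ k.1 then
    if inside then (PySem.Set.add ins (String.mk [k.1], String.mk [k.2.1]), outs, inside)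
    else (ins, PySem.Set.add outs (String.mk [k.1], String.mk [k.2.1]), inside)
  else (ins, outs, inside)

def find_abas (s : String) : (List (String × String)) × (List (String × String)) :=
  let cs := s.toList
  -- zip(s, s[1:], s[2:])
  let triples := List.zip cs (List.zip (PySem.List.slice cs (some 1) none) (PySem.List.slice cs (some 2) none))
  let r := triples.foldl pvStepA (PySem.Set.empty, PySem.Set.empty, false)
  (r.2.1, r.1)

-- ===== PORT B =====
-- _aba_pairs: sliding 3-char window over one bracket-free run
def pvAbaPairs : List Char → List (String × String)
  | a :: b :: c :: r =>
    (if a = c ∧ b ≠ a then [(String.mk [a], String.mk [b])] else []) ++ pvAbaPairs (b :: c :: r)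
  | _ => []

-- pass 1: segmentation loop; state = (runs, cur, inside)
def pvSegRuns : List Char → List (List Char × Bool) → List Char → Bool → List (List Char × Bool)
  | [], runs, cur, inside => if cur = [] then runs else runs ++ [(cur, inside)]
  | ch :: rest, runs, cur, inside =>
    if ch = '[' ∨ ch = ']' then
      pvSegRuns rest (if cur = [] then runs else runs ++ [(cur, inside)]) [] (ch == '[')
    else pvSegRuns rest runs (cur ++ [ch]) inside

def find_abas_alt (s : String) : (List (String × String)) × (List (String × String)) :=
  let runs := pvSegRuns s.toList [] [] false
  let r := runs.foldl (fun st rf =>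
      (pvAbaPairs rf.1).foldl (fun st p =>
        if rf.2 then (PySem.Set.add st.1 p, st.2) else (st.1, PySem.Set.add st.2 p)) st)
    (PySem.Set.empty, PySem.Set.empty)
  (r.2, r.1)

-- ===== PRECONDITION & SPEC =====
def Spec_find_abas (s : String) (out : (List (String × String)) × (List (String × String))) : Prop := out = find_abas_alt s
instance (s : String) (out : (List (String × String)) × (List (String × String))) : Decidable (Spec_find_abas s out) := by unfold Spec_find_abas; infer_instance

-- ===== CLAIM (what is proved, stated in full; the proofs are below) =====
def Claim_equal_find_abas : Prop := ∀ (s : String), Dom_find_abas s → Spec_find_abas s (find_abas s)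

-- ===== LEMMAS AND PROOFS =====

-- A's loop, recast as recursion over suffixes (one step per triple)
def pvRunA : (PySem.Set (String × String) × PySem.Set (String × String) × Bool) → List Char →
    PySem.Set (String × String) × PySem.Set (String × String) × Bool
  | st, a :: b :: c :: r => pvRunA (pvStepA st (a, b, c)) (b :: c :: r)
  | st, [] => st
  | st, [_] => st
  | st, [_, _] => st

-- the common event stream: ordered (flag, pair) insertions both programs perform
def pvEvts : Bool → List Char → List (Bool × (String × String))
  | _, [] => []
  | inside, a :: rest =>
    if a = '[' then pvEvts true rest
    else if a = ']' then pvEvts false rest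
    else
      match rest with
      | b :: c :: _ =>
        if b = '[' ∨ c = '[' ∨ b = ']' ∨ c = ']' then pvEvts inside rest
        else if a = c ∧ b ≠ a then (inside, (String.mk [a], String.mk [b])) :: pvEvts inside rest
        else pvEvts inside rest
      | _ => []

def pvApplyEvt (st : PySem.Set (String × String) × PySem.Set (String × String))
    (e : Bool × (String × String)) : PySem.Set (String × String) × PySem.Set (String × String) :=
  if e.1 then (PySem.Set.add st.1 e.2, st.2) else (st.1, PySem.Set.add st.2 e.2)

-- B's event stream while a run prefix `cur` is still pending
def pvG : List Char → Bool → List Char → List (Bool × (String × String))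
  | cur, inside, [] => (pvAbaPairs cur).map (fun p => (inside, p))
  | cur, inside, ch :: r =>
    if ch = '[' ∨ ch = ']' then
      (pvAbaPairs cur).map (fun p => (inside, p)) ++ pvG [] (ch == '[') r
    else pvG (cur ++ [ch]) inside r

def pvNoBr (u : List Char) : Prop := ∀ ch ∈ u, ch ≠ '[' ∧ ch ≠ ']'

-- one-step unfolding lemmas for the recursive helpers
lemma pvEvts_lb (inside : Bool) (rest : List Char) :
    pvEvts inside ('[' :: rest) = pvEvts true rest := rfl

lemma pvEvts_rb (inside : Bool) (rest : List Char) :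
    pvEvts inside (']' :: rest) = pvEvts false rest := rfl

lemma pvEvts_single (inside : Bool) (a : Char) : pvEvts inside [a] = [] := by
  by_cases h1 : a = '['
  · subst h1; rfl
  by_cases h2 : a = ']'
  · subst h2; rfl
  rw [pvEvts, if_neg h1, if_neg h2]
  simp

lemma pvEvts_pair (inside : Bool) (a b : Char) : pvEvts inside [a, b] = [] := by
  by_cases h1 : a = '['
  · subst h1; rw [pvEvts_lb, pvEvts_single]
  by_cases h2 : a = ']'
  · subst h2; rw [pvEvts_rb, pvEvts_single]
  rw [pvEvts, if_neg h1, if_neg h2]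
  simp

lemma pvEvts_cons3 (inside : Bool) (a b c : Char) (r : List Char)
    (ha1 : a ≠ '[') (ha2 : a ≠ ']') :
    pvEvts inside (a :: b :: c :: r) =
      if b = '[' ∨ c = '[' ∨ b = ']' ∨ c = ']' then pvEvts inside (b :: c :: r)
      else if a = c ∧ b ≠ a then
        (inside, (String.mk [a], String.mk [b])) :: pvEvts inside (b :: c :: r)
      else pvEvts inside (b :: c :: r) := by
  rw [pvEvts]; simp [ha1, ha2]

lemma pvRunA_cons3 (st : PySem.Set (String × String) × PySem.Set (String × String) × Bool)
    (a b c : Char) (r : List Char) :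
    pvRunA st (a :: b :: c :: r) = pvRunA (pvStepA st (a, b, c)) (b :: c :: r) := rfl

lemma pvAbaPairs_cons3 (a b c : Char) (r : List Char) :
    pvAbaPairs (a :: b :: c :: r) =
      (if a = c ∧ b ≠ a then [(String.mk [a], String.mk [b])] else []) ++ pvAbaPairs (b :: c :: r) := rfl

lemma pvSegRuns_cons (ch : Char) (rest : List Char) (runs : List (List Char × Bool))
    (cur : List Char) (inside : Bool) :
    pvSegRuns (ch :: rest) runs cur inside =
      if ch = '[' ∨ ch = ']' then
        pvSegRuns rest (if cur = [] then runs else runs ++ [(cur, inside)]) [] (ch == '[')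
      else pvSegRuns rest runs (cur ++ [ch]) inside := rfl

lemma pvG_cons (cur : List Char) (inside : Bool) (ch : Char) (r : List Char) :
    pvG cur inside (ch :: r) =
      if ch = '[' ∨ ch = ']' then
        (pvAbaPairs cur).map (fun p => (inside, p)) ++ pvG [] (ch == '[') r
      else pvG (cur ++ [ch]) inside r := rfl

lemma pvA1 (cs : List Char) (st : PySem.Set (String × String) × PySem.Set (String × String) × Bool) :
    (List.zip cs (List.zip (cs.drop 1) (cs.drop 2))).foldl pvStepA st = pvRunA st cs := by
  induction st, cs using pvRunA.induct with
  | case1 st a b c r ih =>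
    simpa [pvRunA_cons3, List.zip_cons_cons, List.foldl_cons] using ih
  | case2 st => rfl
  | case3 st x => rfl
  | case4 st x y => rfl

lemma pvA2 (cs : List Char) :
    ∀ (ins outs : PySem.Set (String × String)) (inside : Bool),
    ((pvRunA (ins, outs, inside) cs).1, (pvRunA (ins, outs, inside) cs).2.1)
      = (pvEvts inside cs).foldl pvApplyEvt (ins, outs) := by
  induction cs with
  | nil => intro ins outs inside; rfl
  | cons a rest ih =>
    intro ins outs inside
    match rest with
    | [] => rw [pvEvts_single]; rfl
    | [b] => rw [pvEvts_pair]; rfl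
    | b :: c :: r =>
      rw [pvRunA_cons3]
      by_cases ha1 : a = '['
      · subst ha1
        rw [pvEvts_lb, show pvStepA (ins, outs, inside) ('[', b, c) = (ins, outs, true)
            from by simp [pvStepA]]
        exact ih ins outs true
      · by_cases ha2 : a = ']'
        · subst ha2
          rw [pvEvts_rb, show pvStepA (ins, outs, inside) (']', b, c) = (ins, outs, false)
              from by simp [pvStepA]]
          exact ih ins outs false
        · rw [pvEvts_cons3 inside a b c r ha1 ha2]
          by_cases hbc : b = '[' ∨ c = '[' ∨ b = ']' ∨ c = ']'
          · have h6 : a = '[' ∨ b = '[' ∨ c = '[' ∨ a = ']' ∨ b = ']' ∨ c = ']' := by tauto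
            rw [if_pos hbc, show pvStepA (ins, outs, inside) (a, b, c) = (ins, outs, inside)
                from by
                  simp only [pvStepA]
                  rw [if_neg (by decide : ¬ (3 : Nat) < 3), if_neg ha1, if_neg ha2, if_pos h6]]
            exact ih ins outs inside
          · have h6 : ¬(a = '[' ∨ b = '[' ∨ c = '[' ∨ a = ']' ∨ b = ']' ∨ c = ']') := by tauto
            rw [if_neg hbc]
            by_cases haba : a = c ∧ b ≠ a
            · rw [if_pos haba, List.foldl_cons]
              cases inside
              · rw [show pvStepA (ins, outs, false) (a, b, c)
                    = (ins, PySem.Set.add outs (String.mk [a], String.mk [b]), false)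
                    from by
                      simp only [pvStepA]
                      rw [if_neg (by decide : ¬ (3 : Nat) < 3), if_neg ha1, if_neg ha2,
                        if_neg h6, if_pos haba]
                      rfl]
                rw [show pvApplyEvt (ins, outs) (false, (String.mk [a], String.mk [b]))
                    = (ins, PySem.Set.add outs (String.mk [a], String.mk [b])) from rfl]
                exact ih _ _ _
              · rw [show pvStepA (ins, outs, true) (a, b, c)
                    = (PySem.Set.add ins (String.mk [a], String.mk [b]), outs, true)
                    from by
                      simp only [pvStepA]
                      rw [if_neg (by decide : ¬ (3 : Nat) < 3), if_neg ha1, if_neg ha2,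
                        if_neg h6, if_pos haba]
                      rfl]
                rw [show pvApplyEvt (ins, outs) (true, (String.mk [a], String.mk [b]))
                    = (PySem.Set.add ins (String.mk [a], String.mk [b]), outs) from rfl]
                exact ih _ _ _
            · rw [if_neg haba, show pvStepA (ins, outs, inside) (a, b, c) = (ins, outs, inside)
                  from by
                    simp only [pvStepA]
                    rw [if_neg (by decide : ¬ (3 : Nat) < 3), if_neg ha1, if_neg ha2,
                      if_neg h6, if_neg haba]]
              exact ih ins outs inside

lemma pvL1 (cs : List Char) :
    ∀ (runs : List (List Char × Bool)) (cur : List Char) (inside : Bool),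
    pvSegRuns cs runs cur inside = runs ++ pvSegRuns cs [] cur inside := by
  induction cs with
  | nil =>
    intro runs cur inside
    by_cases h : cur = [] <;> simp [pvSegRuns, h]
  | cons ch rest ih =>
    intro runs cur inside
    rw [pvSegRuns_cons, pvSegRuns_cons]
    simp only [List.nil_append]
    by_cases hb : ch = '[' ∨ ch = ']'
    · rw [if_pos hb, if_pos hb, ih, ih (if cur = [] then [] else [(cur, inside)])]
      by_cases h : cur = [] <;> simp [h]
    · rw [if_neg hb, if_neg hb]
      exact ih runs (cur ++ [ch]) inside

-- B's inner double fold, as a single fold over tagged pairs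
lemma pvTag (ps : List (String × String)) (flag : Bool)
    (st : PySem.Set (String × String) × PySem.Set (String × String)) :
    ps.foldl (fun st p => if flag then (PySem.Set.add st.1 p, st.2) else (st.1, PySem.Set.add st.2 p)) st
      = (ps.map (fun p => (flag, p))).foldl pvApplyEvt st := by
  rw [List.foldl_map]; rfl

lemma pvB1 (cs : List Char) :
    ∀ (cur : List Char) (inside : Bool)
      (st : PySem.Set (String × String) × PySem.Set (String × String)),
    (pvSegRuns cs [] cur inside).foldl (fun st rf =>
        (pvAbaPairs rf.1).foldl (fun st p =>
          if rf.2 then (PySem.Set.add st.1 p, st.2) else (st.1, PySem.Set.add st.2 p)) st) st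
      = (pvG cur inside cs).foldl pvApplyEvt st := by
  induction cs with
  | nil =>
    intro cur inside st
    rw [show pvSegRuns [] [] cur inside = if cur = [] then [] else [(cur, inside)] from rfl]
    rw [show pvG cur inside [] = (pvAbaPairs cur).map (fun p => (inside, p)) from rfl]
    by_cases h : cur = []
    · subst h; rfl
    · rw [if_neg h]
      simp only [List.foldl_cons, List.foldl_nil]
      exact pvTag _ _ _
  | cons ch r ih =>
    intro cur inside st
    rw [pvSegRuns_cons, pvG_cons]
    simp only [List.nil_append]
    by_cases hb : ch = '[' ∨ ch = ']'
    · rw [if_pos hb, if_pos hb, pvL1, List.foldl_append, List.foldl_append, ih]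
      congr 1
      by_cases h : cur = []
      · subst h; rfl
      · rw [if_neg h]
        simp only [List.foldl_cons, List.foldl_nil]
        exact pvTag _ _ _
    · rw [if_neg hb, if_neg hb]
      exact ih _ _ _

lemma pvS1 (u : List Char) :
    ∀ inside, pvNoBr u → pvEvts inside u = (pvAbaPairs u).map (fun p => (inside, p)) := by
  induction u with
  | nil => intro inside _; rfl
  | cons a rest ih =>
    intro inside hnb
    have ha := hnb a (by simp)
    have hrest : pvNoBr rest := fun ch h => hnb ch (by simp [h])
    match rest with
    | [] => rw [pvEvts_single]; rfl
    | [b] => rw [pvEvts_pair]; rfl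
    | b :: c :: v =>
      have hb := hnb b (by simp)
      have hc := hnb c (by simp)
      have h4 : ¬(b = '[' ∨ c = '[' ∨ b = ']' ∨ c = ']') := by tauto
      rw [pvEvts_cons3 inside a b c v ha.1 ha.2, if_neg h4, pvAbaPairs_cons3,
        List.map_append, ih inside hrest]
      by_cases haba : a = c ∧ b ≠ a
      · rw [if_pos haba, if_pos haba]; rfl
      · rw [if_neg haba, if_neg haba]; rfl

lemma pvS2 (ch : Char) (r : List Char) (hch : ch = '[' ∨ ch = ']') :
    ∀ (cur : List Char) (inside : Bool), pvNoBr cur →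
    pvEvts inside (cur ++ ch :: r)
      = (pvAbaPairs cur).map (fun p => (inside, p)) ++ pvEvts (ch == '[') r := by
  intro cur
  induction cur with
  | nil =>
    intro inside _
    rcases hch with h | h
    · subst h; rw [List.nil_append, pvEvts_lb]; rfl
    · subst h
      rw [List.nil_append, pvEvts_rb,
        show ((']' : Char) == '[') = false from by decide]
      rfl
  | cons a cur' ih =>
    intro inside hnb
    have ha := hnb a (by simp)
    have hcur' : pvNoBr cur' := fun x h => hnb x (by simp [h])
    match cur' with
    | [] =>
      match r with
      | [] =>
        rcases hch with h | h <;> subst h <;>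
          simp [pvEvts_pair, pvAbaPairs, pvEvts]
      | c2 :: v =>
        have hbr : ch = '[' ∨ c2 = '[' ∨ ch = ']' ∨ c2 = ']' := by tauto
        simp only [List.cons_append, List.nil_append]
        rw [pvEvts_cons3 inside a ch c2 v ha.1 ha.2, if_pos hbr]
        have := ih inside (fun x h => absurd h (by simp))
        simp only [List.nil_append] at this
        simpa [pvAbaPairs] using this
    | [b] =>
      have hb := hnb b (by simp)
      have hbr : b = '[' ∨ ch = '[' ∨ b = ']' ∨ ch = ']' := by tauto
      simp only [List.cons_append, List.nil_append]
      rw [pvEvts_cons3 inside a b ch r ha.1 ha.2, if_pos hbr]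
      have := ih inside hcur'
      simp only [List.cons_append, List.nil_append] at this
      simpa [pvAbaPairs] using this
    | b :: c :: v =>
      have hb := hnb b (by simp)
      have hc := hnb c (by simp)
      have h4 : ¬(b = '[' ∨ c = '[' ∨ b = ']' ∨ c = ']') := by tauto
      have := ih inside hcur'
      simp only [List.cons_append] at this ⊢
      rw [pvEvts_cons3 inside a b c (v ++ ch :: r) ha.1 ha.2, if_neg h4, this,
        pvAbaPairs_cons3, List.map_append]
      by_cases haba : a = c ∧ b ≠ a
      · rw [if_pos haba, if_pos haba]; rfl
      · rw [if_neg haba, if_neg haba]; rfl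

lemma pvB2 (cs : List Char) :
    ∀ (cur : List Char) (inside : Bool), pvNoBr cur →
    pvG cur inside cs = pvEvts inside (cur ++ cs) := by
  induction cs with
  | nil =>
    intro cur inside h
    rw [List.append_nil, pvS1 cur inside h]; rfl
  | cons ch r ih =>
    intro cur inside h
    rw [pvG_cons]
    by_cases hb : ch = '[' ∨ ch = ']'
    · rw [if_pos hb, ih [] (ch == '[') (fun x hx => absurd hx (by simp)),
        List.nil_append, pvS2 ch r hb cur inside h]
    · rw [if_neg hb, ih (cur ++ [ch]) inside (by
        intro x hx
        rcases List.mem_append.mp hx with hx | hx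
        · exact h x hx
        · simp only [List.mem_singleton] at hx; subst hx; tauto)]
      rw [List.append_assoc]; rfl

-- ===== VERDICT (by name: the statement is the Claim_ definition above) =====
theorem find_abas_spec : Claim_equal_find_abas := by
  intro s _
  show find_abas s = find_abas_alt s
  unfold find_abas find_abas_alt
  simp only
  rw [PySem.List.slice_from_one]
  rw [show PySem.List.slice s.toList (some 2) none = s.toList.drop 2
    from PySem.List.slice_from s.toList (by norm_num : (0:Int) ≤ 2)]
  rw [show s.toList.tail = s.toList.drop 1 from List.drop_one.symm]
  rw [pvA1]
  rw [pvB1 s.toList [] false (PySem.Set.empty, PySem.Set.empty)]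
  rw [pvB2 s.toList [] false (fun x hx => absurd hx (by simp)), List.nil_append]
  rw [← pvA2 s.toList PySem.Set.empty PySem.Set.empty false]
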